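-- pv_equiv track=rewrite | github.com/daniel-reich/ubiquitous-fiesta | MvtxpxtFDrzEtA9k5_22.py | palindrome_descendant
-- ===== SOURCE A (Python) =====
-- def isPalindrom(n):
--   for i in range(len(str(n)) // 2 + 1):
--     if str(n)[i] != str(n)[-(i + 1)]:
--       return False
--   return True
--
-- def palindrome_descendant(num):
--   if isPalindrom(num):
--     return True
--   else:
--     next_n = ""
--     number = [int(d) for d in str(num)]
--     for i in range(0, len(number) - 1, 2):
--       next_n += str(sum(number[i: i + 2]))
--     if int(next_n) // 10 == 0:
--       return isPalindrom(num)
--     else: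
--       return palindrome_descendant(int(next_n))
-- ===== SOURCE B (Python) =====
-- def palindrome_descendant(num):
--     n = num
--     while True:
--         s = str(n)
--         if s == s[::-1]:
--             return True
--         digits = [int(d) for d in s]
--         nxt = int("".join(str(digits[i] + digits[i + 1]) for i in range(0, len(digits) - 1, 2)))
--         if nxt // 10 == 0:
--             return False
--         n = nxt
-- ===== Notes on version B (the rewrite author's own statement) =====
-- stated objective: simpler
-- what changed: B replaces A's recursion by an iterative while-loop, A's indexed half-scan palindrome test by s == s[::-1], A's string accumulation over digit-slices by a join over a comprehension of adjacent-pair sums, and returns False directly in the single-digit terminal branch where A recomputes isPalindrom(num).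
import Mathlib
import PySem

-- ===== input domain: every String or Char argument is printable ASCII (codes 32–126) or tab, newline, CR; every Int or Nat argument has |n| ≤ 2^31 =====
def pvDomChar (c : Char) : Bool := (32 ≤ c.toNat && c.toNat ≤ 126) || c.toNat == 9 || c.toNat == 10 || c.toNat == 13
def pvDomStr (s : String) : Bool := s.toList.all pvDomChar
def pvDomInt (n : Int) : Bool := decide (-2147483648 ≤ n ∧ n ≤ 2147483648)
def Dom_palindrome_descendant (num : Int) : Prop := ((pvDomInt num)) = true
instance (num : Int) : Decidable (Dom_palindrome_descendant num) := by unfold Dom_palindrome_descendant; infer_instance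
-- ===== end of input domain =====

-- B replaces A's recursion by an iterative loop, the indexed half-scan palindrome test by s == s[::-1],
-- and the string accumulation by a join over a comprehension; objective: simpler/alternative, not faster.

-- ===== PORT A =====
-- isPalindrom: for i in range(len(str(n)) // 2 + 1): if str(n)[i] != str(n)[-(i+1)]: return False; return True
-- (the early-return-False loop is the `all` of the comparisons; indices are provably in range for n's
--  decimal string, so pyGetD's default ' ' is never consulted)
def isPalindrom (n : Int) : Bool :=
  (PySem.List.pyRange 0 (PySem.Int.floordiv ((PySem.Int.toChars n).length : Int) 2 + 1) 1).all
    (fun i => PySem.List.pyGetD (PySem.Int.toChars n) i ' '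
           == PySem.List.pyGetD (PySem.Int.toChars n) (-(i + 1)) ' ')

-- the recursion of palindrome_descendant, with fuel (the chain value strictly decreases in Python, so
-- fuel num.toNat + 1 is never exhausted on inputs satisfying Pre_); int(d) / int(next_n) are
-- PySem.Int.ofChars? with .getD 0 on the none branch (Python raises there; unreachable under Pre_)
def pdGo (fuel : Nat) (num : Int) : Bool :=
  match fuel with
  | 0 => false
  | fuel + 1 =>
    if isPalindrom num then true
    else
      let number := (PySem.Int.toChars num).map (fun d => (PySem.Int.ofChars? [d]).getD 0)
      let next_n := (PySem.List.pyRange 0 ((number.length : Int) - 1) 2).foldl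
        (fun acc i => acc ++ PySem.Int.toChars ((PySem.List.slice number (some i) (some (i + 2))).sum)) []
      let v := (PySem.Int.ofChars? next_n).getD 0
      if PySem.Int.floordiv v 10 == 0 then isPalindrom num
      else pdGo fuel v

def palindrome_descendant (num : Int) : Bool := pdGo (num.toNat + 1) num

-- ===== PORT B =====
-- the while-True loop of Source B, same fuel discipline as the A-side recursion
def altGo (fuel : Nat) (n : Int) : Bool :=
  match fuel with
  | 0 => false
  | fuel + 1 =>
    let s := PySem.Int.toChars n
    if s == (PySem.List.slice? s none none (-1)).getD [] then true   -- s == s[::-1]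
    else
      let digits := s.map (fun d => (PySem.Int.ofChars? [d]).getD 0)
      let nxt := (PySem.Int.ofChars? (PySem.Chars.join []
        ((PySem.List.pyRange 0 ((digits.length : Int) - 1) 2).map
          (fun i => PySem.Int.toChars (PySem.List.pyGetD digits i 0 + PySem.List.pyGetD digits (i + 1) 0))))).getD 0
      if PySem.Int.floordiv nxt 10 == 0 then false
      else altGo fuel nxt

def palindrome_descendant_alt (num : Int) : Bool := altGo (num.toNat + 1) num

-- ===== PRECONDITION & SPEC =====
-- A raises ValueError on every negative num (int('-') while listing the digits of str(num)); B raises there too.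
def Pre_palindrome_descendant (num : Int) : Prop := 0 ≤ num
instance (num : Int) : Decidable (Pre_palindrome_descendant num) := by unfold Pre_palindrome_descendant; infer_instance
def pvWitness_palindrome_descendant : Int := (97)

def Spec_palindrome_descendant (num : Int) (out : Bool) : Prop := out = palindrome_descendant_alt num
instance (num : Int) (out : Bool) : Decidable (Spec_palindrome_descendant num out) := by unfold Spec_palindrome_descendant; infer_instance

-- ===== CLAIM (what is proved, stated in full; the proofs are below) =====
def Claim_equal_palindrome_descendant : Prop := ∀ (num : Int), Dom_palindrome_descendant num → Pre_palindrome_descendant num → Spec_palindrome_descendant num (palindrome_descendant num)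

-- ===== LEMMAS AND PROOFS =====

-- A's indexed half-scan (indices 0 .. len//2 against their mirrors) is the full palindrome test
theorem half_all_eq (s : List Char) :
    ((PySem.List.pyRange 0 (PySem.Int.floordiv ((s.length : Int)) 2 + 1) 1).all
      (fun i => PySem.List.pyGetD s i ' ' == PySem.List.pyGetD s (-(i + 1)) ' '))
      = (s == s.reverse) := by
  by_cases hs : s = []
  · subst hs; decide
  · have hlen : 1 ≤ s.length := by
      cases s with
      | nil => exact absurd rfl hs
      | cons c t => simp
    have hfd : PySem.Int.floordiv ((s.length : Int)) 2 = ((s.length / 2 : Nat) : Int) := by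
      exact_mod_cast PySem.Int.floordiv_natCast s.length 2
    have h1 : ((s.length / 2 : Nat) : Int) + 1 = (((s.length / 2 + 1 : Nat)) : Int) := by push_cast; ring
    rw [hfd, h1, PySem.List.pyRange_zero_nat, List.all_map]
    have eL : ∀ (k : Nat) (hk : k < s.length / 2 + 1),
        PySem.List.pyGetD s ((k : Int)) ' ' = s[k]'(by omega) := by
      intro k hk
      rw [PySem.List.pyGetD_natCast, List.getD_eq_getElem _ _ (by omega : k < s.length)]
    have eR : ∀ (k : Nat) (hk : k < s.length / 2 + 1),
        PySem.List.pyGetD s (-((k : Int) + 1)) ' ' = s[s.length - 1 - k]'(by omega) := by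
      intro k hk
      have e2 : -((k : Int) + 1) = -(((k + 1 : Nat) : Int)) := by push_cast; ring
      rw [e2, PySem.List.pyGetD_neg_natCast s (k + 1) ' ' (by omega) (by omega)]
      exact getElem_congr rfl (by omega) (by omega)
    rw [Bool.eq_iff_iff]
    simp only [List.all_eq_true, List.mem_range, Function.comp_apply, beq_iff_eq]
    constructor
    · intro H
      apply List.ext_getElem (by simp)
      intro i h1i h2i
      rw [List.getElem_reverse]
      by_cases hi : i ≤ s.length / 2
      · have h := H i (by omega)
        rw [eL i (by omega), eR i (by omega)] at h
        exact h
      · have h := H (s.length - 1 - i) (by omega)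
        rw [eL _ (by omega), eR _ (by omega),
          getElem_congr rfl (by omega : s.length - 1 - (s.length - 1 - i) = i) (by omega)] at h
        exact h.symm
    · intro hrev k hk
      rw [eL k hk, eR k hk]
      have h' : s[k]? = s.reverse[k]? := by rw [← hrev]
      rw [List.getElem?_reverse (by omega), List.getElem?_eq_getElem (by omega : k < s.length),
          List.getElem?_eq_getElem (by omega : s.length - 1 - k < s.length)] at h'
      exact Option.some.inj h'

theorem isPalindrom_eq_reverse (n : Int) :
    isPalindrom n = (PySem.Int.toChars n == (PySem.Int.toChars n).reverse) :=
  half_all_eq (PySem.Int.toChars n)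

-- A's string accumulation equals B's join-of-map
-- ''.join(parts) is the concatenation of the parts
theorem join_nil_eq_flatten (l : List (List Char)) : PySem.Chars.join [] l = l.flatten := by
  induction l with
  | nil => simp [PySem.Chars.join_nil]
  | cons p rest ih =>
    cases rest with
    | nil => simp [PySem.Chars.join, List.intercalate]
    | cons q t => rw [PySem.Chars.join_cons_cons, ih]; simp

theorem next_chars_eq (number : List Int) :
    (PySem.List.pyRange 0 ((number.length : Int) - 1) 2).foldl
        (fun acc i => acc ++ PySem.Int.toChars ((PySem.List.slice number (some i) (some (i + 2))).sum)) []
      = PySem.Chars.join []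
        ((PySem.List.pyRange 0 ((number.length : Int) - 1) 2).map
          (fun i => PySem.Int.toChars (PySem.List.pyGetD number i 0 + PySem.List.pyGetD number (i + 1) 0))) := by
  rw [join_nil_eq_flatten, PySem.List.foldl_append_eq_flatMap, List.nil_append]
  apply congrArg List.flatten
  apply List.map_congr_left
  intro i hi
  rw [PySem.List.mem_pyRange_iff_of_pos (by norm_num)] at hi
  obtain ⟨h0, hlt, -⟩ := hi
  obtain ⟨k, rfl⟩ : ∃ k : Nat, (k : Int) = i := ⟨i.toNat, Int.toNat_of_nonneg h0⟩
  have hklen : k + 1 < number.length := by omega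
  congr 1
  have h2 : ((k : Int) + 2) = ((k : Int) + ((2 : Nat) : Int)) := by norm_num
  rw [h2, PySem.List.slice_natCast_add]
  have hcast : ((k : Int) + 1) = (((k + 1 : Nat) : Int)) := by push_cast; ring
  have hTake : List.take 2 (List.drop k number) = [number[k], number[k + 1]] := by
    rw [List.drop_eq_getElem_cons (by omega : k < number.length),
        List.drop_eq_getElem_cons (by omega : k + 1 < number.length)]
    rfl
  rw [hTake, hcast, PySem.List.pyGetD_natCast, PySem.List.pyGetD_natCast,
      List.getD_eq_getElem _ _ (by omega), List.getD_eq_getElem _ _ (by omega)]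
  simp

theorem go_eq (fuel : Nat) (n : Int) : pdGo fuel n = altGo fuel n := by
  induction fuel generalizing n with
  | zero => rfl
  | succ fuel ih =>
    rw [pdGo, altGo]
    simp only [PySem.List.slice?_none_none_neg_one, Option.getD_some]
    rw [← isPalindrom_eq_reverse]
    by_cases hp : isPalindrom n
    · simp [hp]
    · simp only [hp, Bool.false_eq_true, if_false]
      rw [next_chars_eq]
      simp [ih]

-- ===== VERDICT (by name: the statement is the Claim_ definition above) =====
theorem palindrome_descendant_spec : Claim_equal_palindrome_descendant := by
  intro num _ _
  unfold Spec_palindrome_descendant palindrome_descendant palindrome_descendant_alt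
  exact go_eq _ _
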